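-- pv_equiv track=rewrite | github.com/DoubleJONY/KDJ-algorithm-challenge | owen/leetcode/p793.py | preimageSizeFZF
-- ===== SOURCE A (Python) =====
-- def preimageSizeFZF(k: int) -> int:
--     def Zeroes(x):
--         cnt = 0
--
--         while x > 0:
--             cnt += x // 5
--             x //= 5
--
--         return cnt
--
--
--     head = 0
--     tail = 10**10
--     while head < tail:
--         pivot = (head + tail )//2
--         if Zeroes(pivot) < k:
--             head = pivot + 1
--         else:
--             tail = pivot
--
--
--     if Zeroes(head) == k:
--         return 5
--     return 0
-- ===== SOURCE B (Python) =====
-- def preimageSizeFZF(k: int) -> int: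
--     # Legendre: Z(n) = sum of base-5 digits of n weighted by w_i = (5^i-1)/4.
--     # k is attained by some n! iff k is representable with digits 0..4 over these weights.
--     if k < 0:
--         return 0
--     w = 1
--     while 5 * w + 1 <= k:
--         w = 5 * w + 1
--     while w > 0:
--         if k // w > 4:
--             return 0
--         k %= w
--         w = (w - 1) // 5
--     return 5
-- ===== Notes on version B (the rewrite author's own statement) =====
-- stated objective: simpler
-- what changed: Replaces the binary search over a fixed huge range (each probe recounting factorial trailing zeros) by a direct greedy digit test in the mixed-radix system of Legendre weights: k is an attained trailing-zero count iff every greedy digit is a valid base-five digit.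
import Mathlib
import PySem

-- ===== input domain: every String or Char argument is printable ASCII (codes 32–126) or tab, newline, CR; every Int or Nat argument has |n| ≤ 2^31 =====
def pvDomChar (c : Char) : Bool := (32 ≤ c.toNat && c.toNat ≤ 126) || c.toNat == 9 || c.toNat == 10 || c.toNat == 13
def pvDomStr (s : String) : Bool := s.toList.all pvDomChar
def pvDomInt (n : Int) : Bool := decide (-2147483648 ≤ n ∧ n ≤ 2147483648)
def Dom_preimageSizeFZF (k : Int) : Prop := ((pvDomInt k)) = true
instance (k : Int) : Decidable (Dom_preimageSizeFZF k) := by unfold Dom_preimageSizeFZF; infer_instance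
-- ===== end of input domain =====

-- B replaces A's binary search (probing factorial trailing-zero counts) by a direct greedy
-- digit test over the Legendre weights; same return value, no search loop.

-- ===== PORT A =====
-- inner helper Zeroes: while x > 0: cnt += x // 5; x //= 5
def pyZeroes (x : Int) : Int :=
  if h : 0 < x then
    PySem.Int.floordiv x 5 + pyZeroes (PySem.Int.floordiv x 5)
  else 0
termination_by x.toNat
decreasing_by
  rw [PySem.Int.floordiv_eq_ediv_of_pos (by omega : (0:Int) < 5)]
  omega

-- while head < tail: pivot = (head+tail)//2; if Zeroes(pivot) < k: head = pivot+1 else tail = pivot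
def pyBS (k head tail : Int) : Int :=
  if h : head < tail then
    let pivot := PySem.Int.floordiv (head + tail) 2
    if pyZeroes pivot < k then pyBS k (pivot + 1) tail
    else pyBS k head pivot
  else head
termination_by (tail - head).toNat
decreasing_by
  all_goals
    simp only [pivot] at *
    rw [PySem.Int.floordiv_eq_ediv_of_pos (by omega : (0:Int) < 2)] at *
    omega

def preimageSizeFZF (k : Int) : Int :=
  let head := pyBS k 0 (10 ^ 10)
  if pyZeroes head = k then 5 else 0

-- ===== PORT B =====
-- while 5*w+1 <= k: w = 5*w+1.  Fuel-bounded: fuel 100 reproduces the Python loop exactly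
-- whenever it stops within 100 iterations, i.e. for every k < (5^101-1)/4 (Dom has |k| ≤ 2^31).
def growW (fuel : Nat) (k w : Int) : Int :=
  match fuel with
  | 0 => w
  | f + 1 => if 5 * w + 1 ≤ k then growW f k (5 * w + 1) else w

-- while w > 0: if k // w > 4: return 0; k %= w; w = (w-1) // 5
def digitLoop (k w : Int) : Int :=
  if h : 0 < w then
    if 4 < PySem.Int.floordiv k w then 0
    else digitLoop (PySem.Int.mod k w) (PySem.Int.floordiv (w - 1) 5)
  else 5
termination_by w.toNat
decreasing_by
  rw [PySem.Int.floordiv_eq_ediv_of_pos (by omega : (0:Int) < 5)]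
  omega

def preimageSizeFZF_alt (k : Int) : Int :=
  if k < 0 then 0
  else digitLoop k (growW 100 k 1)

-- ===== PRECONDITION & SPEC =====
def Spec_preimageSizeFZF (k : Int) (out : Int) : Prop := out = preimageSizeFZF_alt k
instance (k : Int) (out : Int) : Decidable (Spec_preimageSizeFZF k out) := by unfold Spec_preimageSizeFZF; infer_instance

-- ===== CLAIM (what is proved, stated in full; the proofs are below) =====
def Claim_equal_preimageSizeFZF : Prop := ∀ (k : Int), Dom_preimageSizeFZF k → Spec_preimageSizeFZF k (preimageSizeFZF k)

-- ===== LEMMAS AND PROOFS =====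

-- Mathematical model: Zn n = number of trailing zeros of n!, Fm m = m + Zn m (= Zn (5m)),
-- Wn j = (5^j - 1)/4 the Legendre weights.
def Zn (n : Nat) : Nat :=
  if h : n = 0 then 0 else n / 5 + Zn (n / 5)
termination_by n
decreasing_by exact Nat.div_lt_self (Nat.pos_of_ne_zero h) (by norm_num)

def Fm (m : Nat) : Nat := m + Zn m

def Wn : Nat → Nat
  | 0 => 0
  | j + 1 => 5 * Wn j + 1

theorem Zn_zero : Zn 0 = 0 := by
  rw [Zn]
  simp

theorem Zn_eq (n : Nat) : Zn n = n / 5 + Zn (n / 5) := by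
  by_cases h : n = 0
  · subst h; conv_lhs => rw [Zn]
    conv_rhs => rw [Zn]
    simp
  · conv_lhs => rw [Zn]
    simp [h]

theorem Zn_mono : ∀ {m n : Nat}, m ≤ n → Zn m ≤ Zn n := by
  intro m n
  induction n using Nat.strong_induction_on generalizing m with
  | _ n ih =>
    intro h
    by_cases hn : n = 0
    · subst hn
      have : m = 0 := by omega
      subst this; exact le_refl _
    · rw [Zn_eq m, Zn_eq n]
      have h5 : n / 5 < n := Nat.div_lt_self (Nat.pos_of_ne_zero hn) (by norm_num)
      have h1 := ih (n / 5) h5 (Nat.div_le_div_right (c := 5) h)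
      have h2 := Nat.div_le_div_right (c := 5) h
      omega

theorem Zn_lt4 : ∀ m : Nat, 0 < m → 4 * Zn m < m := by
  intro m
  induction m using Nat.strong_induction_on with
  | _ m ih =>
    intro hm
    rw [Zn_eq m]
    by_cases h5 : m / 5 = 0
    · rw [h5]
      conv_lhs => rw [Zn]
      simp; omega
    · have := ih (m / 5) (Nat.div_lt_self hm (by norm_num)) (Nat.pos_of_ne_zero h5)
      omega

theorem Zn_5m (m r : Nat) (hr : r < 5) : Zn (5 * m + r) = m + Zn m := by
  rw [Zn_eq (5 * m + r)]
  have h : (5 * m + r) / 5 = m := by omega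
  rw [h]

theorem Fm_mono {m n : Nat} (h : m ≤ n) : Fm m ≤ Fm n := by
  have := Zn_mono h
  unfold Fm
  omega

theorem pow5_Wn (j : Nat) : 5 ^ j = 4 * Wn j + 1 := by
  induction j with
  | zero => simp [Wn]
  | succ j ih => rw [pow_succ]; simp [Wn]; omega

theorem Wn_mono : ∀ {i j : Nat}, i ≤ j → Wn i ≤ Wn j := by
  intro i j h
  exact monotone_nat_of_le_succ (f := Wn) (fun n => by simp [Wn]; omega) h

theorem Zn_digit : ∀ (j a m : Nat), a ≤ 4 → m < 5 ^ j →
    Zn (a * 5 ^ j + m) = a * Wn j + Zn m := by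
  intro j
  induction j with
  | zero =>
    intro a m ha hm
    have hm0 : m = 0 := by simpa using hm
    subst hm0
    have ha5 : a / 5 = 0 := by omega
    rw [show a * 5 ^ 0 + 0 = a by ring, Zn_eq a, ha5, Zn_zero]
    simp [Wn]
  | succ j ih =>
    intro a m ha hm
    have hq : (5:Nat) ^ (j + 1) = 5 * 5 ^ j := by rw [pow_succ]; ring
    have key : a * 5 ^ (j + 1) + m = 5 * (a * 5 ^ j + m / 5) + m % 5 := by
      have h1 : a * 5 ^ (j + 1) = 5 * (a * 5 ^ j) := by rw [hq]; ring
      omega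
    rw [key, Zn_5m _ _ (Nat.mod_lt _ (by norm_num))]
    have hm5 : m / 5 < 5 ^ j := by
      rw [hq] at hm; omega
    rw [ih a (m / 5) ha hm5, Zn_eq m]
    rw [show Wn (j + 1) = 5 * Wn j + 1 from rfl, pow5_Wn j]
    ring

theorem Fm_digit (j a m : Nat) (ha : a ≤ 4) (hm : m < 5 ^ j) :
    Fm (a * 5 ^ j + m) = a * Wn (j + 1) + Fm m := by
  unfold Fm
  rw [Zn_digit j a m ha hm]
  rw [show Wn (j + 1) = 5 * Wn j + 1 from rfl, pow5_Wn j]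
  ring

theorem Fm_lt (t m : Nat) (ht : 1 ≤ t) (hm : m < 5 ^ t) : Fm m < 5 * Wn t := by
  have hW1 : 1 ≤ Wn t := by
    have : Wn 1 ≤ Wn t := Wn_mono ht
    simpa [Wn] using this
  have hp := pow5_Wn t
  unfold Fm
  by_cases hm0 : m = 0
  · subst hm0; rw [Zn_zero]; omega
  · have h4 := Zn_lt4 m (Nat.pos_of_ne_zero hm0)
    omega

theorem Zn_pow5 (t : Nat) : Zn (5 ^ t) = Wn t := by
  induction t with
  | zero =>
    rw [pow_zero, Zn_eq]
    norm_num [Zn_zero, Wn]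
  | succ t ih =>
    have h : (5:Nat) ^ (t + 1) = 5 * 5 ^ t + 0 := by rw [pow_succ]; ring
    rw [h, Zn_5m _ _ (by norm_num), ih]
    have := pow5_Wn t
    simp [Wn]
    omega

theorem image_Zn_Fm (k : Int) : (∃ n : Nat, (Zn n : Int) = k) ↔ (∃ m : Nat, (Fm m : Int) = k) := by
  constructor
  · rintro ⟨n, hn⟩
    refine ⟨n / 5, ?_⟩
    have : Fm (n / 5) = Zn n := by rw [Zn_eq n]; rfl
    rw [this]; exact hn
  · rintro ⟨m, hm⟩
    refine ⟨5 * m, ?_⟩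
    have : Zn (5 * m) = Fm m := by
      have := Zn_5m m 0 (by norm_num)
      simpa [Fm] using this
    rw [this]; exact hm

-- bridge: the Int-valued port helper computes Zn
theorem pyZeroes_natCast (n : Nat) : pyZeroes (n : Int) = (Zn n : Int) := by
  induction n using Nat.strong_induction_on with
  | _ n ih =>
    by_cases hn : n = 0
    · subst hn
      rw [pyZeroes]; simp [Zn_zero]
    · have hfd : PySem.Int.floordiv (n : Int) 5 = ((n / 5 : Nat) : Int) := by
        exact_mod_cast PySem.Int.floordiv_natCast n 5
      rw [pyZeroes]
      rw [dif_pos (by exact_mod_cast Nat.pos_of_ne_zero hn)]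
      rw [hfd, ih (n / 5) (Nat.div_lt_self (Nat.pos_of_ne_zero hn) (by norm_num))]
      rw [Zn_eq n]
      push_cast
      ring

theorem pyZeroes_nonneg_eq (x : Int) (hx : 0 ≤ x) : pyZeroes x = (Zn x.toNat : Int) := by
  obtain ⟨n, rfl⟩ := Int.eq_ofNat_of_zero_le hx
  simp [pyZeroes_natCast]

-- binary-search invariant
theorem pyBS_spec : ∀ (n : Nat) (k head tail : Int), (tail - head).toNat = n →
    0 ≤ head → head ≤ tail → (head = 0 ∨ pyZeroes (head - 1) < k) → k ≤ pyZeroes tail →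
    0 ≤ pyBS k head tail ∧ (pyBS k head tail = 0 ∨ pyZeroes (pyBS k head tail - 1) < k) ∧
      k ≤ pyZeroes (pyBS k head tail) := by
  intro n
  induction n using Nat.strong_induction_on with
  | _ n ih =>
    intro k head tail hn h0 hht hinv hk
    rw [pyBS]
    by_cases h : head < tail
    · rw [dif_pos h]
      have hp : head ≤ PySem.Int.floordiv (head + tail) 2 ∧
          PySem.Int.floordiv (head + tail) 2 < tail := by
        rw [PySem.Int.floordiv_eq_ediv_of_pos (by omega : (0:Int) < 2)]
        omega
      set p := PySem.Int.floordiv (head + tail) 2 with hpdef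
      by_cases hz : pyZeroes p < k
      · rw [if_pos hz]
        exact ih (tail - (p + 1)).toNat (by omega) k (p + 1) tail rfl (by omega) (by omega)
          (Or.inr (by simpa using hz)) hk
      · rw [if_neg hz]
        exact ih (p - head).toNat (by omega) k head p rfl h0 (by omega) hinv (by omega)
    · rw [dif_neg h]
      have he : head = tail := by omega
      exact ⟨h0, hinv, he ▸ hk⟩

theorem A_vals (k : Int) : preimageSizeFZF k = 5 ∨ preimageSizeFZF k = 0 := by
  simp only [preimageSizeFZF]
  split <;> simp

theorem zeroes_big : (2147483648 : Int) ≤ pyZeroes (10 ^ 10) := by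
  have e1 : ((10:Int) ^ 10) = ((10000000000 : Nat) : Int) := by norm_num
  rw [e1, pyZeroes_natCast]
  have h1 : Zn 10000000000 = 2000000000 + Zn 2000000000 := by
    rw [Zn_eq]; try norm_num
  have h2 : Zn 2000000000 = 400000000 + Zn 400000000 := by
    rw [Zn_eq]; try norm_num
  have : (2147483648 : Nat) ≤ Zn 10000000000 := by omega
  exact_mod_cast this

theorem A_iff (k : Int) (hk : k ≤ pyZeroes (10 ^ 10)) :
    (preimageSizeFZF k = 5 ↔ ∃ n : Nat, (Zn n : Int) = k) := by
  simp only [preimageSizeFZF]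
  obtain ⟨hpos, hmin, hge⟩ := pyBS_spec ((10 ^ 10 - 0 : Int)).toNat k 0 (10 ^ 10) rfl
    (le_refl 0) (by norm_num) (Or.inl rfl) hk
  set h := pyBS k 0 (10 ^ 10) with hdef
  have pz0 : pyZeroes 0 = 0 := by rw [pyZeroes]; norm_num
  have key : (∃ n : Nat, (Zn n : Int) = k) → pyZeroes h = k := by
    rintro ⟨n, hn⟩
    by_cases hh0 : h = 0
    · rw [hh0, pz0]
      rw [hh0, pz0] at hge
      have : (0:Int) ≤ (Zn n : Int) := by positivity
      omega
    · rcases hmin with h0' | hlt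
      · exact absurd h0' hh0
      · have hb1 : pyZeroes (h - 1) = (Zn (h - 1).toNat : Int) :=
          pyZeroes_nonneg_eq _ (by omega)
        have hbh : pyZeroes h = (Zn h.toNat : Int) := pyZeroes_nonneg_eq _ hpos
        rw [hb1] at hlt
        rw [← hn] at hlt
        have hlt' : Zn (h - 1).toNat < Zn n := by exact_mod_cast hlt
        have hle : (h - 1).toNat < n := by
          by_contra hc
          push_neg at hc
          exact absurd (Zn_mono hc) (by omega)
        have hle2 : h.toNat ≤ n := by omega
        have := Zn_mono hle2
        rw [hbh, ← hn]
        have : (Zn h.toNat : Int) ≤ (Zn n : Int) := by exact_mod_cast this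
        rw [hbh, ← hn] at hge
        omega
  constructor
  · intro h5
    by_cases he : pyZeroes h = k
    · exact ⟨h.toNat, by rw [← pyZeroes_nonneg_eq h hpos]; exact he⟩
    · simp [he] at h5
  · intro hex
    rw [key hex]
    simp

-- greedy digit test is exact
theorem greedy_iff : ∀ (j k : Nat),
    (digitLoop (k : Int) ((Wn (j + 1) : Nat) : Int) = 5 ↔ ∃ m, m < 5 ^ (j + 1) ∧ Fm m = k) := by
  have hfd : ∀ (a b : Nat), PySem.Int.floordiv (a : Int) (b : Int) = ((a / b : Nat) : Int) :=
    fun a b => by exact_mod_cast PySem.Int.floordiv_natCast a b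
  have hmd : ∀ (a b : Nat), PySem.Int.mod (a : Int) (b : Int) = ((a % b : Nat) : Int) :=
    fun a b => by exact_mod_cast PySem.Int.mod_natCast a b
  have zn_small : ∀ m : Nat, m < 5 → Zn m = 0 := by
    intro m hm
    rw [Zn_eq]
    have h5 : m / 5 = 0 := by omega
    rw [h5, Zn_zero]
  intro j
  induction j with
  | zero =>
    intro k
    have hW1 : (Wn 1 : Nat) = 1 := by simp [Wn]
    rw [hW1]
    rw [digitLoop, dif_pos (by norm_num : (0:Int) < (1:Nat))]
    have : ((1:Nat) : Int) = (1 : Int) := by norm_num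
    rw [this, show PySem.Int.floordiv (k : Int) 1 = ((k / 1 : Nat) : Int) from hfd k 1]
    rw [Nat.div_one]
    by_cases hk4 : 4 < k
    · rw [if_pos (by exact_mod_cast hk4)]
      simp only [show ((0:Int) = 5) = False by simp, false_iff]
      rintro ⟨m, hm5, hFm⟩
      have : Fm m = m := by simp [Fm, zn_small m (by simpa using hm5)]
      omega
    · rw [if_neg (by exact_mod_cast hk4)]
      rw [show PySem.Int.mod (k : Int) 1 = ((k % 1 : Nat) : Int) from hmd k 1]
      rw [Nat.mod_one]
      rw [show ((1:Int) - 1) = ((0 : Nat) : Int) by norm_num]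
      rw [show PySem.Int.floordiv ((0:Nat) : Int) 5 = (((0/5) : Nat) : Int) from hfd 0 5]
      have h55 : digitLoop ((0:Nat) : Int) (((0/5 : Nat)) : Int) = 5 := by
        rw [digitLoop, dif_neg (by norm_num)]
      refine iff_of_true h55 ⟨k, ?_, by simp [Fm, zn_small k (by omega)]⟩
      have h5 : (5:Nat) ^ (0 + 1) = 5 := by norm_num
      omega
  | succ j ih =>
    intro k
    have hWpos : 0 < Wn (j + 1 + 1) := by
      have h : Wn (j + 1 + 1) = 5 * Wn (j + 1) + 1 := rfl
      omega
    rw [digitLoop, dif_pos (by exact_mod_cast hWpos)]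
    rw [hfd k (Wn (j + 1 + 1))]
    have hq : (5:Nat) ^ (j + 1 + 1) = 5 * 5 ^ (j + 1) := by rw [pow_succ]; ring
    have hqpos : 0 < (5:Nat) ^ (j + 1) := pow_pos (by norm_num) _
    by_cases hd : 4 < k / Wn (j + 1 + 1)
    · rw [if_pos (by exact_mod_cast hd)]
      simp only [show ((0:Int) = 5) = False by simp, false_iff]
      rintro ⟨m, hm, hFm⟩
      have hflt := Fm_lt (j + 1 + 1) m (by omega) hm
      have h5W : 5 * Wn (j + 1 + 1) ≤ k :=
        (Nat.le_div_iff_mul_le hWpos).mp (by omega)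
      omega
    · rw [if_neg (by exact_mod_cast hd)]
      rw [hmd k (Wn (j + 1 + 1))]
      have hW1 : ((Wn (j + 1 + 1) : Nat) : Int) - 1 = ((5 * Wn (j + 1) : Nat) : Int) := by
        push_cast [Wn]; ring
      have hfd5 : PySem.Int.floordiv ((5 * Wn (j + 1) : Nat) : Int) 5 = ((Wn (j + 1) : Nat) : Int) := by
        rw [show (5:Int) = ((5:Nat) : Int) by norm_num, hfd, Nat.mul_div_cancel_left _ (by norm_num)]
      rw [hW1, hfd5]
      rw [ih (k % Wn (j + 1 + 1))]
      have hWeq : Wn (j + 1 + 1) = 5 * Wn (j + 1) + 1 := by simp [Wn]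
      constructor
      · rintro ⟨m', hm', hF'⟩
        refine ⟨(k / Wn (j + 1 + 1)) * 5 ^ (j + 1) + m', ?_, ?_⟩
        · have h1 : (k / Wn (j + 1 + 1)) * 5 ^ (j + 1) ≤ 4 * 5 ^ (j + 1) :=
            Nat.mul_le_mul_right _ (by omega)
          rw [hq]; omega
        · rw [Fm_digit (j + 1) _ m' (by omega) hm', hF']
          exact Nat.div_add_mod' k (Wn (j + 1 + 1))
      · rintro ⟨m, hm, hF⟩
        have ha : m / 5 ^ (j + 1) ≤ 4 := by
          have : m / 5 ^ (j + 1) < 5 := (Nat.div_lt_iff_lt_mul hqpos).mpr (by rw [hq] at hm; omega)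
          omega
        have hm'lt : m % 5 ^ (j + 1) < 5 ^ (j + 1) := Nat.mod_lt _ hqpos
        have hsplit : (m / 5 ^ (j + 1)) * 5 ^ (j + 1) + m % 5 ^ (j + 1) = m :=
          Nat.div_add_mod' m _
        have hFm : Fm m = (m / 5 ^ (j + 1)) * Wn (j + 1 + 1) + Fm (m % 5 ^ (j + 1)) := by
          conv_lhs => rw [← hsplit]
          exact Fm_digit (j + 1) _ _ ha hm'lt
        have hF'lt : Fm (m % 5 ^ (j + 1)) < 5 * Wn (j + 1) :=
          Fm_lt (j + 1) _ (by omega) hm'lt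
        refine ⟨m % 5 ^ (j + 1), hm'lt, ?_⟩
        rw [← hF, hFm]
        rw [Nat.mul_comm (m / 5 ^ (j + 1)) (Wn (j + 1 + 1))]
        rw [Nat.mul_add_mod]
        exact (Nat.mod_eq_of_lt (by omega)).symm

theorem digitLoop_vals : ∀ (n : Nat) (k w : Int), w.toNat = n →
    digitLoop k w = 0 ∨ digitLoop k w = 5 := by
  intro n
  induction n using Nat.strong_induction_on with
  | _ n ih =>
    intro k w hw
    rw [digitLoop]
    by_cases h : 0 < w
    · rw [dif_pos h]
      by_cases hc : 4 < PySem.Int.floordiv k w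
      · rw [if_pos hc]; left; rfl
      · rw [if_neg hc]
        refine ih (PySem.Int.floordiv (w - 1) 5).toNat ?_ _ _ rfl
        rw [PySem.Int.floordiv_eq_ediv_of_pos (by omega : (0:Int) < 5)]
        omega
    · rw [dif_neg h]; right; rfl

theorem growW_spec : ∀ (fuel j : Nat) (k : Int), 1 ≤ j → k < ((Wn (j + fuel) : Nat) : Int) →
    ∃ t, 1 ≤ t ∧ growW fuel k ((Wn j : Nat) : Int) = ((Wn t : Nat) : Int) ∧
      k < ((Wn (t + 1) : Nat) : Int) := by
  intro fuel
  induction fuel with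
  | zero =>
    intro j k hj hk
    refine ⟨j, hj, rfl, lt_of_lt_of_le (by simpa using hk) ?_⟩
    exact_mod_cast Wn_mono (by omega : j ≤ j + 1)
  | succ f ihf =>
    intro j k hj hk
    simp only [growW]
    by_cases hc : 5 * ((Wn j : Nat) : Int) + 1 ≤ k
    · rw [if_pos hc]
      have he : 5 * ((Wn j : Nat) : Int) + 1 = ((Wn (j + 1) : Nat) : Int) := by
        push_cast [Wn]; ring
      rw [he]
      refine ihf (j + 1) k (by omega) ?_
      have : j + 1 + f = j + (f + 1) := by omega
      rw [this]; exact hk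
    · rw [if_neg hc]
      refine ⟨j, hj, rfl, ?_⟩
      have : ((Wn (j + 1) : Nat) : Int) = 5 * ((Wn j : Nat) : Int) + 1 := by
        push_cast [Wn]; ring
      omega

theorem B_vals (k : Int) : preimageSizeFZF_alt k = 5 ∨ preimageSizeFZF_alt k = 0 := by
  unfold preimageSizeFZF_alt
  by_cases h : k < 0
  · rw [if_pos h]; right; rfl
  · rw [if_neg h]
    exact (digitLoop_vals (growW 100 k 1).toNat k (growW 100 k 1) rfl).symm

theorem B_iff (k : Int) (hk : k ≤ 2147483648) :
    (preimageSizeFZF_alt k = 5 ↔ ∃ n : Nat, (Zn n : Int) = k) := by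
  by_cases hneg : k < 0
  · simp only [preimageSizeFZF_alt, if_pos hneg]
    constructor
    · intro h; omega
    · rintro ⟨n, hn⟩
      have : (0:Int) ≤ (Zn n : Int) := by positivity
      omega
  · obtain ⟨n0, rfl⟩ := Int.eq_ofNat_of_zero_le (not_lt.mp hneg)
    simp only [preimageSizeFZF_alt, if_neg hneg]
    have hn0 : n0 ≤ 2147483648 := by exact_mod_cast hk
    have h15 : (2147483648 : Nat) < Wn 15 := by norm_num [Wn]
    have hb : ((n0 : Nat) : Int) < ((Wn (1 + 100) : Nat) : Int) := by
      have h101 : Wn 15 ≤ Wn (1 + 100) := Wn_mono (by omega)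
      have : n0 < Wn (1 + 100) := by omega
      exact_mod_cast this
    have h1 : (1 : Int) = ((Wn 1 : Nat) : Int) := by simp [Wn]
    rw [h1]
    obtain ⟨t, ht1, hgrow, hlt⟩ := growW_spec 100 1 ((n0 : Nat) : Int) le_rfl hb
    rw [hgrow]
    have ht : t = (t - 1) + 1 := by omega
    rw [show ((Wn t : Nat) : Int) = ((Wn ((t - 1) + 1) : Nat) : Int) by rw [← ht]]
    rw [greedy_iff (t - 1) n0]
    rw [image_Zn_Fm]
    have hltn : n0 < Wn (t + 1) := by exact_mod_cast hlt
    constructor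
    · rintro ⟨m, hm, hF⟩
      exact ⟨m, by exact_mod_cast hF⟩
    · rintro ⟨m, hF⟩
      have hFn : Fm m = n0 := by exact_mod_cast hF
      refine ⟨m, ?_, hFn⟩
      by_contra hge
      push_neg at hge
      have hmono := Fm_mono hge
      have hFp : Fm (5 ^ ((t - 1) + 1)) = Wn ((t - 1) + 1 + 1) := by
        unfold Fm
        rw [Zn_pow5]
        have h1 := pow5_Wn ((t - 1) + 1)
        have h2 : Wn ((t - 1) + 1 + 1) = 5 * Wn ((t - 1) + 1) + 1 := rfl
        omega
      rw [show (t - 1) + 1 + 1 = t + 1 by omega] at hFp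
      omega

-- ===== VERDICT (by name: the statement is the Claim_ definition above) =====
theorem preimageSizeFZF_spec : Claim_equal_preimageSizeFZF := by
  intro k hdom
  unfold Spec_preimageSizeFZF
  have hd : k ≤ 2147483648 := by
    simp only [Dom_preimageSizeFZF, pvDomInt, decide_eq_true_eq] at hdom
    omega
  have hA := A_iff k (le_trans hd zeroes_big)
  have hB := B_iff k hd
  rcases A_vals k with h5 | h0
  · rw [h5]; rcases B_vals k with hb | hb
    · rw [hb]
    · exfalso; rw [hb] at hB; rw [h5] at hA
      have := hA.mp rfl
      have := hB.mpr this
      omega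
  · rw [h0]; rcases B_vals k with hb | hb
    · exfalso; rw [hb] at hB; rw [h0] at hA
      have := hB.mp rfl
      have := hA.mpr this
      omega
    · rw [hb]
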